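-- pv_equiv track=rewrite | github.com/RBlasser/alpha_challenge | mod_prepago/mod/util_prepago_v2.py | update_bal
-- ===== SOURCE A (Python) =====
-- def update_bal(vector, bal0):
--     bal = bal0
--     res = []
--     for i in range(len(vector)):
--         bal = bal - vector[i]
--         if bal < 0:
--             res.append(i)
--             break
--
--     return res[0] + 1
-- ===== SOURCE B (Python) =====
-- def update_bal(vector, bal0):
--     # pass 1: table of running prefix sums
--     prefixes = []
--     t = 0
--     for v in vector:
--         t += v
--         prefixes.append(t)
--     # pass 2: all indices where the balance has gone negative; first one + 1
--     indices = [i for i, p in enumerate(prefixes) if bal0 - p < 0]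
--     return indices[0] + 1
-- ===== Notes on version B (the rewrite author's own statement) =====
-- stated objective: alternative
-- what changed: Replaced the single early-exit scan that mutates the balance with a two-pass decomposition: one pass builds the prefix-sum table, a second pass collects all crossing indices and takes the first.
import Mathlib
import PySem

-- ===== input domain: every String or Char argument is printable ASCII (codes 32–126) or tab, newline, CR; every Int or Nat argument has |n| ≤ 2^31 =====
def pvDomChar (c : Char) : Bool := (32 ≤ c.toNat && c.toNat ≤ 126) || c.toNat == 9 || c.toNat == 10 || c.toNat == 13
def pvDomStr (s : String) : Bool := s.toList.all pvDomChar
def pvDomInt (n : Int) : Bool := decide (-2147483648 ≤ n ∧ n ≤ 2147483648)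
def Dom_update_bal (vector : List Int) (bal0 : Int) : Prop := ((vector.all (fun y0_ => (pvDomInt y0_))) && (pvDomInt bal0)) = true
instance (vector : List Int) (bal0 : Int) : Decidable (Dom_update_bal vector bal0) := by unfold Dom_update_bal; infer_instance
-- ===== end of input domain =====

-- B replaces A's early-exit mutating scan by a two-pass decomposition (prefix-sum table, then index search); same cost, alternative structure.


-- ===== PORT A =====
-- the for-loop with its early break: bal is the running balance, i the loop index; returns res
def aLoop : List Int → Int → Int → List Int
  | [], _, _ => []
  | x :: xs, bal, i =>
    let b := bal - x
    if b < 0 then [i] else aLoop xs b (i + 1)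

def update_bal (vector : List Int) (bal0 : Int) : Int :=
  let res := aLoop vector bal0 0
  match PySem.List.pyGet? res 0 with   -- res[0]: IndexError (none) when no crossing; excluded by Pre_
  | some v => v + 1
  | none => 0

-- ===== PORT B =====
-- pass 1: the prefix-sum table (t is the running total)
def bPrefixes : List Int → Int → List Int
  | [], _ => []
  | v :: vs, t => (t + v) :: bPrefixes vs (t + v)

-- pass 2: the comprehension over enumerate(prefixes)
def bIndices (bal0 : Int) : List Int → Int → List Int
  | [], _ => []
  | p :: ps, i => if bal0 - p < 0 then i :: bIndices bal0 ps (i + 1) else bIndices bal0 ps (i + 1)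

def update_bal_alt (vector : List Int) (bal0 : Int) : Int :=
  let prefixes := bPrefixes vector 0
  let indices := bIndices bal0 prefixes 0
  match PySem.List.pyGet? indices 0 with   -- indices[0]: IndexError (none) when no crossing; excluded by Pre_
  | some v => v + 1
  | none => 0

-- ===== PRECONDITION & SPEC =====
-- Pre_ excludes exactly the inputs where the balance never goes negative: there A (and B) raise IndexError.
def Pre_update_bal (vector : List Int) (bal0 : Int) : Prop :=
  ∃ i ∈ List.range vector.length, bal0 - ((vector.take (i + 1)).sum) < 0
instance (vector : List Int) (bal0 : Int) : Decidable (Pre_update_bal vector bal0) := by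
  unfold Pre_update_bal; infer_instance
def pvWitness_update_bal : List Int × Int := ([1], 0)

def Spec_update_bal (vector : List Int) (bal0 : Int) (out : Int) : Prop := out = update_bal_alt vector bal0
instance (vector : List Int) (bal0 : Int) (out : Int) : Decidable (Spec_update_bal vector bal0 out) := by unfold Spec_update_bal; infer_instance

-- ===== CLAIM (what is proved, stated in full; the proofs are below) =====
def Claim_equal_update_bal : Prop := ∀ (vector : List Int) (bal0 : Int), Dom_update_bal vector bal0 → Pre_update_bal vector bal0 → Spec_update_bal vector bal0 (update_bal vector bal0)

-- ===== LEMMAS AND PROOFS =====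
theorem aLoop_head_eq_bIndices_head :
    ∀ (vs : List Int) (bal0 t i : Int),
      (aLoop vs (bal0 - t) i).head? = (bIndices bal0 (bPrefixes vs t) i).head? := by
  intro vs
  induction vs with
  | nil => intro _ _ _; rfl
  | cons x xs ih =>
    intro bal0 t i
    simp only [aLoop, bPrefixes, bIndices]
    have hb : bal0 - t - x = bal0 - (t + x) := by ring
    rw [hb]
    by_cases h : bal0 - (t + x) < 0
    · simp [h]
    · simp only [if_neg h]
      exact ih bal0 (t + x) (i + 1)

theorem pyGet?_zero_head {xs : List Int} : PySem.List.pyGet? xs 0 = xs.head? := by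
  cases xs <;> simp [PySem.List.pyGet?, PySem.List.pyIdx?]

-- ===== VERDICT (by name: the statement is the Claim_ definition above) =====
theorem update_bal_spec : Claim_equal_update_bal := by
  intro vector bal0 _ _
  unfold Spec_update_bal update_bal update_bal_alt
  have h := aLoop_head_eq_bIndices_head vector bal0 0 0
  rw [sub_zero] at h
  simp only [pyGet?_zero_head, h]
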